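-- pv_equiv track=rewrite | github.com/tkemmer/rustims | imspy/imspy/simulation/utility.py | generate_index_list
-- ===== SOURCE A (Python) =====
-- def generate_index_list(results, sequence):
--     """Generate a list of indices along with amino acids and modified patterns."""
--     index_list = []
--     chars_removed_counter = 0
--
--     for (start, end, mod) in results:
--         num_chars_removed = end - start
--         mod = sequence[start:end]
--
--         if start != 0:
--             current_aa_index = start - 1
--             later_aa_index = current_aa_index - chars_removed_counter
--         else:
--             later_aa_index = 0
--
--         index_list.append((later_aa_index, mod))
--         chars_removed_counter += num_chars_removed
--
--     return index_list
-- ===== SOURCE B (Python) =====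
-- import itertools
--
--
-- def generate_index_list(results, sequence):
--     """Generate a list of indices along with amino acids and modified patterns."""
--     lengths = [end - start for (start, end, _mod) in results]
--     offsets = [0] + list(itertools.accumulate(lengths))[:-1]
--     return [(0 if start == 0 else start - 1 - offset, sequence[start:end])
--             for (start, end, _mod), offset in zip(results, offsets)]
-- ===== Notes on version B (the rewrite author's own statement) =====
-- stated objective: alternative
-- what changed: Replaced the single pass threading a chars_removed accumulator through the loop by two separate passes: first an exclusive prefix-sum table of span lengths (itertools.accumulate), then one zip/comprehension mapping each span with its precomputed offset to its output tuple.
import Mathlib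
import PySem

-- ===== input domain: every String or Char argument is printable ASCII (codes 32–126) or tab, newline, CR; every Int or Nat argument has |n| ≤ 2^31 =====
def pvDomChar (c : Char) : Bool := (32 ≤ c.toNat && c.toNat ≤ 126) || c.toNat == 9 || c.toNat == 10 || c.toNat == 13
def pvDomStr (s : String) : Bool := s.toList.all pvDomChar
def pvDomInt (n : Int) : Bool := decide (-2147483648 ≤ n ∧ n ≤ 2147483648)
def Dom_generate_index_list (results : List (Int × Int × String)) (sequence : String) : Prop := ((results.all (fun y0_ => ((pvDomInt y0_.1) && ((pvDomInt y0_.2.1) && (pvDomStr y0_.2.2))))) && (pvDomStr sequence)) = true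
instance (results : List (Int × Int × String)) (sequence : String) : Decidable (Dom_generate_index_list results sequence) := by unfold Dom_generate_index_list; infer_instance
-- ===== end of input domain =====

-- B builds an exclusive prefix-sum offset table first, then maps each span with its offset; same output list.
-- ===== PORT A =====
-- the for-loop of A, threading the chars_removed_counter accumulator; entries appended in order
def pvAGo (sequence : String) : List (Int × Int × String) → Int → List (Int × String)
  | [], _chars_removed_counter => []
  | (start, end_, _mod) :: rest, chars_removed_counter =>
    let num_chars_removed := end_ - start
    let mod := PySem.Str.slice sequence (some start) (some end_)
    let entry : Int × String :=
      if start ≠ 0 then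
        let current_aa_index := start - 1
        (current_aa_index - chars_removed_counter, mod)
      else (0, mod)
    entry :: pvAGo sequence rest (chars_removed_counter + num_chars_removed)

def generate_index_list (results : List (Int × Int × String)) (sequence : String) : List (Int × String) :=
  pvAGo sequence results 0

-- ===== PORT B =====
-- itertools.accumulate: running (inclusive) sums starting from seed c
def pvAccumulate : List Int → Int → List Int
  | [], _ => []
  | x :: xs, c => (c + x) :: pvAccumulate xs (c + x)

def generate_index_list_alt (results : List (Int × Int × String)) (sequence : String) : List (Int × String) :=
  let lengths := results.map (fun r => r.2.1 - r.1)
  let offsets := 0 :: (pvAccumulate lengths 0).dropLast   -- [0] + accumulate(lengths)[:-1]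
  (results.zip offsets).map (fun p =>
    ((if p.1.1 == 0 then (0 : Int) else p.1.1 - 1 - p.2),
     PySem.Str.slice sequence (some p.1.1) (some p.1.2.1)))

-- ===== PRECONDITION & SPEC =====
def Spec_generate_index_list (results : List (Int × Int × String)) (sequence : String) (out : List (Int × String)) : Prop := out = generate_index_list_alt results sequence
instance (results : List (Int × Int × String)) (sequence : String) (out : List (Int × String)) : Decidable (Spec_generate_index_list results sequence out) := by unfold Spec_generate_index_list; infer_instance

-- ===== CLAIM (what is proved, stated in full; the proofs are below) =====
def Claim_equal_generate_index_list : Prop := ∀ (results : List (Int × Int × String)) (sequence : String), Dom_generate_index_list results sequence → Spec_generate_index_list results sequence (generate_index_list results sequence)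

-- ===== LEMMAS AND PROOFS =====

-- ===== VERDICT (by name: the statement is the Claim_ definition above) =====
-- zip ignores a longer second list's last element
theorem pv_zip_dropLast {α β : Type} (l : List α) (m : List β) (h : l.length < m.length) :
    l.zip m.dropLast = l.zip m := by
  induction l generalizing m with
  | nil => simp
  | cons a l ih =>
    match m with
    | [] => simp at h
    | [b] => simp at h
    | b :: b2 :: m' =>
      simp only [List.dropLast_cons₂, List.zip_cons_cons]
      rw [ih]
      simpa using h

def pvOffsets (l : List (Int × Int × String)) (c : Int) : List Int :=
  c :: pvAccumulate (l.map (fun r => r.2.1 - r.1)) c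

theorem pv_length_accumulate (l : List Int) (c : Int) : (pvAccumulate l c).length = l.length := by
  induction l generalizing c with
  | nil => rfl
  | cons x xs ih => simp [pvAccumulate, ih]

-- A's accumulator-threaded loop equals the zip-with-offsets map, for any starting counter
theorem pv_main (sequence : String) (l : List (Int × Int × String)) (c : Int) :
    pvAGo sequence l c =
      (l.zip (pvOffsets l c)).map (fun p =>
        ((if p.1.1 == 0 then (0 : Int) else p.1.1 - 1 - p.2),
         PySem.Str.slice sequence (some p.1.1) (some p.1.2.1))) := by
  induction l generalizing c with
  | nil => rfl
  | cons r rest ih =>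
    obtain ⟨s, e, m⟩ := r
    simp only [pvAGo, pvOffsets, List.map_cons, List.zip_cons_cons, pvAccumulate]
    refine congrArg₂ List.cons ?_ ?_
    · by_cases hs : s = 0 <;> simp [hs]
    · simpa [pvOffsets] using ih (c + (e - s))

theorem generate_index_list_spec : Claim_equal_generate_index_list := by
  intro results sequence _hdom
  unfold Spec_generate_index_list generate_index_list generate_index_list_alt
  rw [pv_main]
  match results with
  | [] => rfl
  | r :: rs =>
    congr 1
    have hd : (0 : Int) :: (pvAccumulate ((r :: rs).map (fun r => r.2.1 - r.1)) 0).dropLast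
        = ((0 : Int) :: pvAccumulate ((r :: rs).map (fun r => r.2.1 - r.1)) 0).dropLast := by
      simp [pvAccumulate]
    rw [hd, pv_zip_dropLast _ _ (by simp [pv_length_accumulate])]
    simp [pvOffsets, pvAccumulate]
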